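-- pv_equiv track=rewrite | github.com/ernesto-vieiram/Weka-Document-Classification | createARFF.py | createDocumentFrequency
-- ===== SOURCE A (Python) =====
-- def createDocumentFrequency(vectors, categories):
--     catvocab = {}
--     for cat in categories:
--         if cat not in catvocab: catvocab[cat] = {}
--
--     for vector in vectors:
--         cat = vector[0][1]
--         words = vector[0][2:]
--         counts = vector[1][2:]
--
--         for i in range(len(words)):
--             if words[i] not in catvocab[cat]:
--                 catvocab[cat][words[i]] = 1
--             else:
--                 catvocab[cat][words[i]] += 1
--     return catvocab
-- ===== SOURCE B (Python) =====
-- def createDocumentFrequency(vectors, categories):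
--     # Phase 1: group all words by category (categories seeded so empty ones survive).
--     groups = {cat: [] for cat in categories}
--     for vector in vectors:
--         groups[vector[0][1]].extend(vector[0][2:])
--     # Phase 2: tally each category's collected word stream.
--     catvocab = {}
--     for cat, words in groups.items():
--         tally = {}
--         for w in words:
--             tally[w] = tally.get(w, 0) + 1
--         catvocab[cat] = tally
--     return catvocab
-- ===== Notes on version B (the rewrite author's own statement) =====
-- stated objective: alternative
-- what changed: B replaces A's inline per-vector nested counting into the shared nested dict by a two-phase decomposition: one scan groups each category's words into a concatenated list, then each category's list is tallied independently into a fresh dict.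
-- outside the precondition, e.g. on createDocumentFrequency([(['9cy', ''], ['a', ' ', ''])], []): A returns {}, B raises KeyError
import Mathlib
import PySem

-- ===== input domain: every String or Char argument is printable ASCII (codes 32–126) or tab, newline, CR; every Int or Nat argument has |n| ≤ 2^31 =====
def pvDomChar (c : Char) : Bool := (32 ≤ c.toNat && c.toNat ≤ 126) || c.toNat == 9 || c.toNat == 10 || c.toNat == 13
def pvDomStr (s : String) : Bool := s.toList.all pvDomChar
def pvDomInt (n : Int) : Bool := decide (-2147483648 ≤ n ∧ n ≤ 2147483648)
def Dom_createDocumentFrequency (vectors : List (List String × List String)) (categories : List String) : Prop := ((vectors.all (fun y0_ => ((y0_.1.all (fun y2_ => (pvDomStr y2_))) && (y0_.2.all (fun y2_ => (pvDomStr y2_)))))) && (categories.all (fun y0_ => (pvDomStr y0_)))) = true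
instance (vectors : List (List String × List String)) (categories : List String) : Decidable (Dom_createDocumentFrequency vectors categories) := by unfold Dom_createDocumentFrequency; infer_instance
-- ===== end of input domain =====

-- B regroups the work: phase 1 collects each category's word stream, phase 2 tallies each stream
-- independently (same return value; equivalence is about the return value only — neither mutates its arguments).

-- ===== PORT A =====
def createDocumentFrequency (vectors : List (List String × List String)) (categories : List String) : List (String × List (String × Int)) :=
  let catvocab0 : PySem.Dict String (PySem.Dict String Int) :=
    categories.foldl (fun d cat => if !(d.contains cat) then d.insert cat PySem.Dict.empty else d) PySem.Dict.empty
  let catvocab :=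
    vectors.foldl (fun d vector =>
      let cat := PySem.List.pyGetD vector.1 1 ""
      let words := PySem.List.slice vector.1 (some 2) none
      let _counts := PySem.List.slice vector.2 (some 2) none
      (PySem.List.pyRange 0 (PySem.List.len words) 1).foldl (fun d i =>
        let w := PySem.List.pyGetD words i ""
        let inner := d.getD cat PySem.Dict.empty
        if !(inner.contains w) then d.insert cat (inner.insert w 1)
        else d.insert cat (inner.insert w (inner.getD w 0 + 1))) d) catvocab0
  catvocab.items.map (fun p => (p.1, p.2.items))

-- ===== PORT B =====
def createDocumentFrequency_alt (vectors : List (List String × List String)) (categories : List String) : List (String × List (String × Int)) :=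
  let groups0 : PySem.Dict String (List String) :=
    categories.foldl (fun d cat => d.insert cat []) PySem.Dict.empty
  let groups :=
    vectors.foldl (fun g vector =>
      g.modify (PySem.List.pyGetD vector.1 1 "") [] (· ++ PySem.List.slice vector.1 (some 2) none)) groups0
  let catvocab :=
    groups.items.foldl (fun r p =>
      r.insert p.1 (p.2.foldl (fun t w => t.insert w (t.getD w 0 + 1)) PySem.Dict.empty)) PySem.Dict.empty
  catvocab.items.map (fun p => (p.1, p.2.items))

-- ===== PRECONDITION & SPEC =====
-- Pre_ excludes vectors whose first list has fewer than 2 elements (IndexError in both) and vectors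
-- whose category is not in categories: there A raises KeyError as soon as the vector has a word, but
-- happens to return when it has none (the inner loop never touches catvocab[cat]); B's grouping phase
-- raises KeyError on every such vector, so those inputs stay outside the claim.
def Pre_createDocumentFrequency (vectors : List (List String × List String)) (categories : List String) : Prop :=
  ∀ v ∈ vectors, 2 ≤ v.1.length ∧ PySem.List.pyGetD v.1 1 "" ∈ categories
instance (vectors : List (List String × List String)) (categories : List String) : Decidable (Pre_createDocumentFrequency vectors categories) := by unfold Pre_createDocumentFrequency; infer_instance

def pvWitness_createDocumentFrequency : (List (List String × List String)) × List String :=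
  ([(["h", "a", "x", "x"], ["c", "n", "1", "1"])], ["a", "b"])

def Spec_createDocumentFrequency (vectors : List (List String × List String)) (categories : List String) (out : List (String × List (String × Int))) : Prop := out = createDocumentFrequency_alt vectors categories
instance (vectors : List (List String × List String)) (categories : List String) (out : List (String × List (String × Int))) : Decidable (Spec_createDocumentFrequency vectors categories out) := by unfold Spec_createDocumentFrequency; infer_instance

-- ===== CLAIM (what is proved, stated in full; the proofs are below) =====
def Claim_equal_createDocumentFrequency : Prop := ∀ (vectors : List (List String × List String)) (categories : List String), Dom_createDocumentFrequency vectors categories → Pre_createDocumentFrequency vectors categories → Spec_createDocumentFrequency vectors categories (createDocumentFrequency vectors categories)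

-- ===== LEMMAS AND PROOFS =====

def pvKey (v : List String × List String) : String := PySem.List.pyGetD v.1 1 ""
def pvWords (v : List String × List String) : List String := v.1.drop 2
def pvTally (t : PySem.Dict String Int) (w : String) : PySem.Dict String Int := t.insert w (t.getD w 0 + 1)
def pvNStep (cat : String) (d : PySem.Dict String (PySem.Dict String Int)) (w : String) : PySem.Dict String (PySem.Dict String Int) :=
  d.insert cat (pvTally (d.getD cat PySem.Dict.empty) w)
def pvAStep (d : PySem.Dict String (PySem.Dict String Int)) (v : List String × List String) : PySem.Dict String (PySem.Dict String Int) :=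
  (pvWords v).foldl (pvNStep (pvKey v)) d
def pvGroup (c : String) (l : List (List String × List String)) : List String :=
  l.flatMap (fun v => if pvKey v = c then pvWords v else [])

lemma pvUpdate_of_mem (s : PySem.Set String) (xs : List String) (h : ∀ x ∈ xs, x ∈ s) : PySem.Set.update s xs = s := by
  rw [PySem.Set.update_eq_append_filter]
  have hf : (PySem.Set.ofList xs).filter (fun y => !(PySem.Set.contains s y)) = [] := by
    rw [List.filter_eq_nil_iff]
    intro y hy
    simp [PySem.Set.mem_ofList] at hy
    simp [h y hy]
  rw [hf, List.append_nil]

-- A's per-vector body equals pvAStep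
lemma pvAStep_eq (d : PySem.Dict String (PySem.Dict String Int)) (v : List String × List String) :
    (PySem.List.pyRange 0 (PySem.List.len (PySem.List.slice v.1 (some 2) none)) 1).foldl (fun d i =>
        let w := PySem.List.pyGetD (PySem.List.slice v.1 (some 2) none) i ""
        let inner := d.getD (PySem.List.pyGetD v.1 1 "") PySem.Dict.empty
        if !(inner.contains w) then d.insert (PySem.List.pyGetD v.1 1 "") (inner.insert w 1)
        else d.insert (PySem.List.pyGetD v.1 1 "") (inner.insert w (inner.getD w 0 + 1))) d
    = pvAStep d v := by
  have hs : PySem.List.slice v.1 (some 2) none = v.1.drop 2 := by simp [pysem]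
  rw [hs]
  rw [PySem.List.foldl_pyRange_zero_pyGetD (v.1.drop 2) "" (fun d w =>
        let inner := d.getD (PySem.List.pyGetD v.1 1 "") PySem.Dict.empty
        if !(inner.contains w) then d.insert (PySem.List.pyGetD v.1 1 "") (inner.insert w 1)
        else d.insert (PySem.List.pyGetD v.1 1 "") (inner.insert w (inner.getD w 0 + 1))) d]
  unfold pvAStep pvWords
  apply List.foldl_ext
  intro a w _
  show _ = pvNStep (pvKey v) a w
  unfold pvNStep pvTally pvKey
  by_cases h : (a.getD (PySem.List.pyGetD v.1 1 "") PySem.Dict.empty).contains w = true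
  · simp [h]
  · simp only [Bool.not_eq_true] at h
    rw [PySem.Dict.getD_of_not_contains (h := h)]
    simp [h]

lemma pvInnerGetD (words : List String) (cat c : String) :
    ∀ d : PySem.Dict String (PySem.Dict String Int),
    (words.foldl (pvNStep cat) d).getD c PySem.Dict.empty
      = if c = cat then words.foldl pvTally (d.getD cat PySem.Dict.empty) else d.getD c PySem.Dict.empty := by
  induction words with
  | nil => intro d; by_cases h : c = cat <;> simp [List.foldl, h]
  | cons w ws ih =>
    intro d
    simp only [List.foldl]
    rw [ih]
    unfold pvNStep
    by_cases h : c = cat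
    · simp [h, PySem.Dict.getD_insert_self]
    · rw [if_neg h, if_neg h, PySem.Dict.getD_insert_of_ne (hne := h)]

lemma pvInnerKeys (words : List String) (cat : String) :
    ∀ d : PySem.Dict String (PySem.Dict String Int), d.contains cat = true →
    (words.foldl (pvNStep cat) d).keys = d.keys := by
  induction words with
  | nil => intro d _; rfl
  | cons w ws ih =>
    intro d hc
    simp only [List.foldl]
    rw [ih _ (by unfold pvNStep; exact PySem.Dict.contains_insert_self _ _ _)]
    exact PySem.Dict.keys_insert_of_contains _ _ hc

lemma pvOuterGetD (l : List (List String × List String)) (c : String) :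
    ∀ d : PySem.Dict String (PySem.Dict String Int),
    (l.foldl pvAStep d).getD c PySem.Dict.empty
      = (pvGroup c l).foldl pvTally (d.getD c PySem.Dict.empty) := by
  induction l with
  | nil => intro d; simp [pvGroup]
  | cons v vs ih =>
    intro d
    have hg : pvGroup c (v :: vs) = (if pvKey v = c then pvWords v else []) ++ pvGroup c vs := by
      simp [pvGroup]
    simp only [List.foldl]
    rw [ih, hg, List.foldl_append]
    unfold pvAStep
    rw [pvInnerGetD]
    by_cases h : pvKey v = c
    · simp [h]
    · simp [h, Ne.symm h]

lemma pvOuterKeys (l : List (List String × List String)) :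
    ∀ d : PySem.Dict String (PySem.Dict String Int), (∀ v ∈ l, d.contains (pvKey v) = true) →
    (l.foldl pvAStep d).keys = d.keys := by
  induction l with
  | nil => intro d _; rfl
  | cons v vs ih =>
    intro d hc
    simp only [List.foldl]
    have h1 : (pvAStep d v).keys = d.keys :=
      pvInnerKeys _ _ _ (hc v (by simp))
    rw [ih _ (fun u hu => by
      rw [PySem.Dict.contains_eq_decide_mem_keys, h1, ← PySem.Dict.contains_eq_decide_mem_keys]
      exact hc u (by simp [hu])), h1]

-- seed loop of A
lemma pvSeedAKeys (cats : List String) :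
    ∀ d : PySem.Dict String (PySem.Dict String Int),
    (cats.foldl (fun d cat => if !(d.contains cat) then d.insert cat PySem.Dict.empty else d) d).keys
      = PySem.Set.update d.keys cats := by
  induction cats with
  | nil => intro d; simp [PySem.Set.update_nil]
  | cons c cs ih =>
    intro d
    simp only [List.foldl]
    rw [ih, PySem.Set.update_cons]
    by_cases h : d.contains c = true
    · rw [if_neg (by simp [h]), PySem.Set.add_of_mem ((PySem.Dict.contains_iff_mem_keys _ _).1 h)]
    · simp only [Bool.not_eq_true] at h
      rw [if_pos (by simp [h]), PySem.Dict.keys_insert_of_not_contains (h := h),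
        PySem.Set.add_of_not_mem (by intro hm; exact absurd ((PySem.Dict.contains_iff_mem_keys _ _).2 hm) (by simp [h]))]

lemma pvSeedAGetD (cats : List String) (c : String) :
    ∀ d : PySem.Dict String (PySem.Dict String Int),
    (cats.foldl (fun d cat => if !(d.contains cat) then d.insert cat PySem.Dict.empty else d) d).getD c PySem.Dict.empty
      = d.getD c PySem.Dict.empty := by
  induction cats with
  | nil => intro d; rfl
  | cons c' cs ih =>
    intro d
    simp only [List.foldl]
    rw [ih]
    by_cases h : d.contains c' = true
    · simp [h]
    · simp only [Bool.not_eq_true] at h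
      rw [if_pos (by simp [h]), PySem.Dict.getD_insert]
      by_cases hc : c = c'
      · rw [if_pos hc, hc, PySem.Dict.getD_of_not_contains (h := h)]
      · rw [if_neg hc]

-- seed loop of B
lemma pvSeedBKeys (cats : List String) :
    ∀ d : PySem.Dict String (List String),
    (cats.foldl (fun d cat => d.insert cat []) d).keys = PySem.Set.update d.keys cats := by
  induction cats with
  | nil => intro d; simp [PySem.Set.update_nil]
  | cons c cs ih =>
    intro d
    simp only [List.foldl]
    rw [ih, PySem.Set.update_cons]
    by_cases h : d.contains c = true
    · rw [PySem.Dict.keys_insert_of_contains _ _ h, PySem.Set.add_of_mem ((PySem.Dict.contains_iff_mem_keys _ _).1 h)]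
    · simp only [Bool.not_eq_true] at h
      rw [PySem.Dict.keys_insert_of_not_contains (h := h),
        PySem.Set.add_of_not_mem (by intro hm; exact absurd ((PySem.Dict.contains_iff_mem_keys _ _).2 hm) (by simp [h]))]

lemma pvSeedBGetD (cats : List String) (c : String) :
    ∀ d : PySem.Dict String (List String),
    (cats.foldl (fun d cat => d.insert cat []) d).getD c []
      = if c ∈ cats then [] else d.getD c [] := by
  induction cats with
  | nil => intro d; simp
  | cons c' cs ih =>
    intro d
    simp only [List.foldl]
    rw [ih]
    by_cases h : c ∈ cs
    · simp [h]
    · rw [if_neg h, PySem.Dict.getD_insert]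
      by_cases hc : c = c'
      · simp [hc]
      · simp [hc, h]

-- B's grouping loop
lemma pvModGetD (l : List (List String × List String)) (c : String) :
    ∀ d : PySem.Dict String (List String),
    (l.foldl (fun g v => g.modify (pvKey v) [] (· ++ pvWords v)) d).getD c []
      = d.getD c [] ++ pvGroup c l := by
  induction l with
  | nil => intro d; simp [pvGroup]
  | cons v vs ih =>
    intro d
    simp only [List.foldl]
    rw [ih, PySem.Dict.getD_modify]
    have hg : pvGroup c (v :: vs) = (if pvKey v = c then pvWords v else []) ++ pvGroup c vs := by
      simp [pvGroup]
    rw [hg]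
    by_cases h : pvKey v = c
    · simp [h]
    · rw [if_neg h, if_neg (fun hh => h hh.symm), List.nil_append]

lemma pvModKeys (l : List (List String × List String)) (d : PySem.Dict String (List String)) :
    (l.foldl (fun g v => g.modify (pvKey v) [] (· ++ pvWords v)) d).keys
      = PySem.Set.update d.keys (l.map pvKey) :=
  PySem.Dict.keys_foldl_modify_key l pvKey [] (fun _ v => (· ++ pvWords v)) d

lemma pvResultItems (gitems : List (String × List String)) (h : (gitems.map Prod.fst).Nodup) :
    (gitems.foldl (fun r p =>
        r.insert p.1 (p.2.foldl (fun t w => t.insert w (t.getD w 0 + 1)) (PySem.Dict.empty : PySem.Dict String Int))) PySem.Dict.empty).items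
      = gitems.map (fun p => (p.1, p.2.foldl (fun t w => t.insert w (t.getD w 0 + 1)) (PySem.Dict.empty : PySem.Dict String Int))) := by
  have := PySem.Dict.items_foldl_insert_fresh (l := gitems) (k := Prod.fst)
    (v := fun p => p.2.foldl (fun t w => t.insert w (t.getD w 0 + 1)) (PySem.Dict.empty : PySem.Dict String Int))
    (d := PySem.Dict.empty) (by intro a _; simp) h
  simpa using this

lemma pvA_char (vectors : List (List String × List String)) (categories : List String)
    (hkey : ∀ v ∈ vectors, pvKey v ∈ categories) :
    createDocumentFrequency vectors categories
      = (PySem.Set.ofList categories).map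
          (fun c => (c, ((pvGroup c vectors).foldl pvTally PySem.Dict.empty).items)) := by
  unfold createDocumentFrequency
  simp only []
  set cv0 := categories.foldl (fun d cat => if !(d.contains cat) then d.insert cat PySem.Dict.empty else d) (PySem.Dict.empty : PySem.Dict String (PySem.Dict String Int)) with hcv0
  have hcv0keys : cv0.keys = PySem.Set.ofList categories := by
    rw [hcv0, pvSeedAKeys]
    exact PySem.Set.update_nil_left categories
  have hcv0c : ∀ v ∈ vectors, cv0.contains (pvKey v) = true := by
    intro v hv
    rw [PySem.Dict.contains_eq_decide_mem_keys, hcv0keys]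
    simp [PySem.Set.mem_ofList]
    exact hkey v hv
  have hfold : vectors.foldl (fun d vector =>
      (PySem.List.pyRange 0 (PySem.List.len (PySem.List.slice vector.1 (some 2) none)) 1).foldl (fun d i =>
        let w := PySem.List.pyGetD (PySem.List.slice vector.1 (some 2) none) i ""
        let inner := d.getD (PySem.List.pyGetD vector.1 1 "") PySem.Dict.empty
        if !(inner.contains w) then d.insert (PySem.List.pyGetD vector.1 1 "") (inner.insert w 1)
        else d.insert (PySem.List.pyGetD vector.1 1 "") (inner.insert w (inner.getD w 0 + 1))) d) cv0
      = vectors.foldl pvAStep cv0 :=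
    List.foldl_ext _ _ cv0 (fun a v _ => pvAStep_eq a v)
  rw [hfold]
  have hkeys : (vectors.foldl pvAStep cv0).keys = PySem.Set.ofList categories := by
    rw [pvOuterKeys vectors cv0 hcv0c, hcv0keys]
  have hnd : (vectors.foldl pvAStep cv0).keys.Nodup := by
    rw [hkeys]; exact PySem.Set.nodup_ofList _
  rw [PySem.Dict.items_eq_map_keys _ hnd PySem.Dict.empty, hkeys, List.map_map]
  apply List.map_congr_left
  intro c _
  simp only [Function.comp]
  rw [pvOuterGetD, pvSeedAGetD]
  simp [PySem.Dict.getD_empty]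

lemma pvB_char (vectors : List (List String × List String)) (categories : List String)
    (hkey : ∀ v ∈ vectors, pvKey v ∈ categories) :
    createDocumentFrequency_alt vectors categories
      = (PySem.Set.ofList categories).map
          (fun c => (c, ((pvGroup c vectors).foldl pvTally PySem.Dict.empty).items)) := by
  unfold createDocumentFrequency_alt
  simp only []
  set g0 := categories.foldl (fun d cat => d.insert cat []) (PySem.Dict.empty : PySem.Dict String (List String)) with hg0
  have hg0keys : g0.keys = PySem.Set.ofList categories := by
    rw [hg0, pvSeedBKeys]
    exact PySem.Set.update_nil_left categories
  set G := vectors.foldl (fun g vector =>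
      g.modify (PySem.List.pyGetD vector.1 1 "") [] (· ++ PySem.List.slice vector.1 (some 2) none)) g0 with hG
  have hGeq : G = vectors.foldl (fun g v => g.modify (pvKey v) [] (· ++ pvWords v)) g0 := by
    rw [hG]
    apply List.foldl_ext
    intro a v _
    have hs : PySem.List.slice v.1 (some 2) none = v.1.drop 2 := by simp [pysem]
    rw [hs]; rfl
  have hGkeys : G.keys = PySem.Set.ofList categories := by
    rw [hGeq, pvModKeys, hg0keys]
    apply pvUpdate_of_mem
    intro x hx
    simp only [List.mem_map] at hx
    obtain ⟨v, hv, rfl⟩ := hx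
    rw [PySem.Set.mem_ofList]
    exact hkey v hv
  have hGnd : G.keys.Nodup := by rw [hGkeys]; exact PySem.Set.nodup_ofList _
  have hGitems : G.items = (PySem.Set.ofList categories).map (fun c => (c, pvGroup c vectors)) := by
    rw [PySem.Dict.items_eq_map_keys _ hGnd [], hGkeys]
    apply List.map_congr_left
    intro c hc
    rw [hGeq, pvModGetD, hg0, pvSeedBGetD]
    rw [PySem.Set.mem_ofList] at hc
    simp [hc]
  have hnd2 : (G.items.map Prod.fst).Nodup := by
    have : G.items.map Prod.fst = G.keys := rfl
    rw [this]; exact hGnd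
  have hri := pvResultItems G.items hnd2
  rw [hri, List.map_map, hGitems, List.map_map]
  apply List.map_congr_left
  intro c _
  rfl

-- ===== VERDICT (by name: the statement is the Claim_ definition above) =====
theorem createDocumentFrequency_spec : Claim_equal_createDocumentFrequency := by
  intro vectors categories _ hpre
  show createDocumentFrequency vectors categories = createDocumentFrequency_alt vectors categories
  have hkey : ∀ v ∈ vectors, pvKey v ∈ categories := fun v hv => (hpre v hv).2
  rw [pvA_char vectors categories hkey, pvB_char vectors categories hkey]
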